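-- pv_equiv track=rewrite | github.com/Wulfic/Cicada3301 | tools/page1_chain_attack.py | to_ascii_stream
-- ===== SOURCE A (Python) =====
-- from typing import List, Tuple
--
-- TOKEN_TO_CHAR = {
--     "F": "F",
--     "U": "U",
--     "TH": "T",
--     "O": "O",
--     "R": "R",
--     "C": "C",
--     "G": "G",
--     "W": "W",
--     "H": "H",
--     "N": "N",
--     "I": "I",
--     "J": "J",
--     "EO": "E",
--     "P": "P",
--     "X": "X",
--     "S": "S",
--     "T": "T",
--     "B": "B",
--     "E": "E",
--     "M": "M",
--     "L": "L",
--     "NG": "N",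
--     "OE": "O",
--     "D": "D",
--     "A": "A",
--     "AE": "A",
--     "Y": "Y",
--     "IA": "I",
--     "EA": "E",
-- }
--
-- def to_ascii_stream(rendered: str) -> str:
--     # Pull out our rune tokens and map them to a single-letter-ish stream.
--     # This makes frequency scoring less exploitable by TH/EO etc.
--     out: List[str] = []
--     i = 0
--     while i < len(rendered):
--         # tokens include "TH", "EO", "NG", "OE", "AE", "IA", "EA" or single letters.
--         if rendered[i].isalpha():
--             # Try digraph tokens first
--             if i + 1 < len(rendered):
--                 two = rendered[i : i + 2]
--                 if two in TOKEN_TO_CHAR: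
--                     out.append(TOKEN_TO_CHAR[two])
--                     i += 2
--                     continue
--             one = rendered[i]
--             if one in TOKEN_TO_CHAR:
--                 out.append(TOKEN_TO_CHAR[one])
--         i += 1
--     return "".join(out)
-- ===== SOURCE B (Python) =====
-- import re
--
-- TOKEN_TO_CHAR = {
--     "F": "F", "U": "U", "TH": "T", "O": "O", "R": "R", "C": "C", "G": "G",
--     "W": "W", "H": "H", "N": "N", "I": "I", "J": "J", "EO": "E", "P": "P",
--     "X": "X", "S": "S", "T": "T", "B": "B", "E": "E", "M": "M", "L": "L",
--     "NG": "N", "OE": "O", "D": "D", "A": "A", "AE": "A", "Y": "Y",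
--     "IA": "I", "EA": "E",
-- }
--
-- # All two-char tokens first, then the single-char keys: the regex engine's
-- # greedy left-to-right scan then matches digraphs before singletons and
-- # silently skips any character that starts no token.
-- _TOKENS = [t for t in TOKEN_TO_CHAR if len(t) == 2] + \
--           [t for t in TOKEN_TO_CHAR if len(t) == 1]
-- _PAT = re.compile("|".join(_TOKENS))
--
-- def to_ascii_stream(rendered: str) -> str:
--     return "".join(TOKEN_TO_CHAR[t] for t in _PAT.findall(rendered))
-- ===== Notes on version B (the rewrite author's own statement) =====
-- stated objective: idiomatic
-- what changed: A's hand-written index loop with isalpha guard, slicing and dict probes is replaced by one compiled regex alternation (digraph tokens before single-letter tokens) whose findall does the greedy left-to-right tokenization, with the matches mapped through TOKEN_TO_CHAR and joined.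
import Mathlib
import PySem

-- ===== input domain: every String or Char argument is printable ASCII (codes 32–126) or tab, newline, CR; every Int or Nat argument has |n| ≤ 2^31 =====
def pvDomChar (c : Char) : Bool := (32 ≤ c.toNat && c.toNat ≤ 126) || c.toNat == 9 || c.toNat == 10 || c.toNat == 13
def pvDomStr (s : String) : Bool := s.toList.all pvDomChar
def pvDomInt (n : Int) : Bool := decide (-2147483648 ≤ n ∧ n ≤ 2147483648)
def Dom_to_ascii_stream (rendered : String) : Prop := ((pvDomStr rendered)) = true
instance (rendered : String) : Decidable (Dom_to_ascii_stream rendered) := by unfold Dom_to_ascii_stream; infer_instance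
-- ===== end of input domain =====

-- B replaces A's hand-rolled index/branch scanner by a tokenizer: one token list
-- (digraphs first, then single-letter keys, mirroring Source B's compiled regex
-- alternation) is matched greedily left to right and the matches are mapped
-- through the table; same output, asymptotically same cost (objective: idiomatic;
-- a timing run measured B faster by a constant factor, the C regex engine).

-- ===== PORT A =====
-- TOKEN_TO_CHAR, in Python insertion order (shared module constant of both versions)
def pvTok : PySem.Dict String String := PySem.Dict.ofList
  [("F","F"),("U","U"),("TH","T"),("O","O"),("R","R"),("C","C"),("G","G"),
   ("W","W"),("H","H"),("N","N"),("I","I"),("J","J"),("EO","E"),("P","P"),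
   ("X","X"),("S","S"),("T","T"),("B","B"),("E","E"),("M","M"),("L","L"),
   ("NG","N"),("OE","O"),("D","D"),("A","A"),("AE","A"),("Y","Y"),
   ("IA","I"),("EA","E")]

-- A's while-loop over the index i; `out.append`/`continue` become the accumulator
-- and the recursive calls; `rendered[i:i+2]` is PySem.List.slice.
def pvLoopA (cs : List Char) (i : Nat) (out : List String) : List String :=
  if h : i < cs.length then
    if PySem.Chars.isalpha cs[i] then
      if i + 1 < cs.length ∧
         pvTok.contains (String.ofList (PySem.List.slice cs (some (i:Int)) (some ((i:Int)+2)))) = true then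
        pvLoopA cs (i+2)
          (out ++ [pvTok.getD (String.ofList (PySem.List.slice cs (some (i:Int)) (some ((i:Int)+2)))) ""])
      else if pvTok.contains (String.ofList [cs[i]]) then
        pvLoopA cs (i+1) (out ++ [pvTok.getD (String.ofList [cs[i]]) ""])
      else pvLoopA cs (i+1) out
    else pvLoopA cs (i+1) out
  else out
termination_by cs.length - i

def to_ascii_stream (rendered : String) : String :=
  PySem.Str.join "" (pvLoopA rendered.toList 0 [])

-- ===== PORT B =====
-- Source B's regex pattern "TH|EO|NG|OE|AE|IA|EA|F|U|O|R|...": the alternation, as a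
-- token list in pattern order.
def pvTokenList : List (List Char) :=
  [['T','H'],['E','O'],['N','G'],['O','E'],['A','E'],['I','A'],['E','A'],
   ['F'],['U'],['O'],['R'],['C'],['G'],['W'],['H'],['N'],['I'],['J'],
   ['P'],['X'],['S'],['T'],['B'],['E'],['M'],['L'],['D'],['A'],['Y']]

-- first alternative of the pattern matching at the current position (re semantics)
def pvMatchAt (toks : List (List Char)) (cs : List Char) : Option (List Char) :=
  match toks with
  | [] => none
  | t :: ts => if t.isPrefixOf cs then some t else pvMatchAt ts cs

theorem pvMatchAt_mem {toks : List (List Char)} {cs t : List Char}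
    (h : pvMatchAt toks cs = some t) : t ∈ toks := by
  induction toks with
  | nil => simp [pvMatchAt] at h
  | cons a ts ih =>
    by_cases hp : a.isPrefixOf cs
    · simp [pvMatchAt, hp] at h; simp [h]
    · simp [pvMatchAt, hp] at h; exact List.mem_cons_of_mem _ (ih h)

theorem pvTokenList_length_pos : ∀ t ∈ pvTokenList, 0 < t.length := by decide

-- re.findall: scan left to right, emit each leftmost match, skip one char when
-- nothing in the alternation matches.
def pvFindAll : List Char → List (List Char)
  | [] => []
  | c :: rest =>
    match hm : pvMatchAt pvTokenList (c :: rest) with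
    | some t => t :: pvFindAll ((c :: rest).drop t.length)
    | none => pvFindAll rest
termination_by cs => cs.length
decreasing_by
  · have := pvTokenList_length_pos _ (pvMatchAt_mem hm)
    simp; omega
  · simp

-- "".join(TOKEN_TO_CHAR[t] for t in _PAT.findall(rendered)); every match is a
-- dict key, so getD's default is never used.
def to_ascii_stream_alt (rendered : String) : String :=
  PySem.Str.join "" ((pvFindAll rendered.toList).map (fun t => pvTok.getD (String.ofList t) ""))

-- ===== PRECONDITION & SPEC =====
def Spec_to_ascii_stream (rendered : String) (out : String) : Prop := out = to_ascii_stream_alt rendered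
instance (rendered : String) (out : String) : Decidable (Spec_to_ascii_stream rendered out) := by unfold Spec_to_ascii_stream; infer_instance

-- ===== CLAIM (what is proved, stated in full; the proofs are below) =====
def Claim_equal_to_ascii_stream : Prop := ∀ (rendered : String), Dom_to_ascii_stream rendered → Spec_to_ascii_stream rendered (to_ascii_stream rendered)

-- ===== LEMMAS AND PROOFS =====

-- the digraph tokens and the single-letter tokens, separately
def pvDigs : List (List Char) :=
  [['T','H'],['E','O'],['N','G'],['O','E'],['A','E'],['I','A'],['E','A']]
def pvSingles : List Char :=
  ['F','U','O','R','C','G','W','H','N','I','J','P','X','S','T','B','E','M','L','D','A','Y']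

theorem pvTokenList_eq : pvTokenList = pvDigs ++ (pvSingles.map (fun x => [x])) := by decide

theorem pfx_cons (a b : Char) (as bs : List Char) :
    (a::as).isPrefixOf (b::bs) = (a == b && as.isPrefixOf bs) := rfl
theorem pfx_nil (bs : List Char) : ([] : List Char).isPrefixOf bs = true := rfl

theorem pvMatchAt_append (ts us : List (List Char)) (cs : List Char) :
    pvMatchAt (ts ++ us) cs =
      (match pvMatchAt ts cs with
       | some t => some t
       | none => pvMatchAt us cs) := by
  induction ts with
  | nil => simp [pvMatchAt]
  | cons a ts ih =>
    by_cases hp : a.isPrefixOf cs <;> simp [pvMatchAt, hp, ih]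

theorem pvMatchAt_digs_short (ts : List (List Char)) (h : ∀ t ∈ ts, t.length = 2) (c : Char) :
    pvMatchAt ts [c] = none := by
  induction ts with
  | nil => rfl
  | cons a ts ih =>
    obtain ⟨x, y, rfl⟩ := List.length_eq_two.mp (h a (by simp))
    simp [pvMatchAt, pfx_cons]
    exact ih (fun t ht => h t (by simp [ht]))

theorem pvMatchAt_digs (ts : List (List Char)) (h : ∀ t ∈ ts, t.length = 2)
    (c d : Char) (rest : List Char) :
    pvMatchAt ts (c :: d :: rest) = (if [c, d] ∈ ts then some [c, d] else none) := by
  induction ts with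
  | nil => rfl
  | cons a ts ih =>
    obtain ⟨x, y, rfl⟩ := List.length_eq_two.mp (h a (by simp))
    rw [pvMatchAt]
    simp only [pfx_cons, pfx_nil, Bool.and_true]
    by_cases hx : x = c <;> by_cases hy : y = d
    · subst hx; subst hy; simp
    · have hd : ¬ d = y := fun hh => hy hh.symm
      simp [hx, hd, ih (fun t ht => h t (by simp [ht]))]
      exact fun hh => absurd hh hy
    · have hc : ¬ c = x := fun hh => hx hh.symm
      simp [hc, hy, ih (fun t ht => h t (by simp [ht]))]
      exact fun hh => absurd hh hx
    · have hc : ¬ c = x := fun hh => hx hh.symm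
      simp [hc, hy, ih (fun t ht => h t (by simp [ht]))]

theorem pvMatchAt_singles (xs : List Char) (c : Char) (rest : List Char) :
    pvMatchAt (xs.map (fun x => [x])) (c :: rest) = (if c ∈ xs then some [c] else none) := by
  induction xs with
  | nil => rfl
  | cons x xs ih =>
    rw [List.map_cons, pvMatchAt]
    simp only [pfx_cons, pfx_nil, Bool.and_true]
    by_cases hx : x = c
    · subst hx; simp
    · have hc : ¬ c = x := fun hh => hx hh.symm
      simp [hc, hx, ih]

-- characterization of one scan step of B
theorem pvMatch_char1 (c : Char) :
    pvMatchAt pvTokenList [c] = (if c ∈ pvSingles then some [c] else none) := by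
  rw [pvTokenList_eq, pvMatchAt_append, pvMatchAt_digs_short pvDigs (by decide) c,
      pvMatchAt_singles]

theorem pvMatch_char2 (c d : Char) (rest : List Char) :
    pvMatchAt pvTokenList (c :: d :: rest) =
      (if [c, d] ∈ pvDigs then some [c, d]
       else if c ∈ pvSingles then some [c] else none) := by
  rw [pvTokenList_eq, pvMatchAt_append, pvMatchAt_digs pvDigs (by decide) c d rest]
  by_cases h2 : [c, d] ∈ pvDigs
  · simp [h2]
  · simp [h2, pvMatchAt_singles]

-- bridges from the String-keyed dict to the char-list token sets
theorem beq_ofl (s k : List Char) : (String.ofList s == String.ofList k) = decide (s = k) := by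
  by_cases h : s = k
  · subst h; simp
  · simp [h]; intro hh; exact absurd (String.ofList_inj.mp hh) h

theorem pvTok_items : pvTok.items =
  [("F","F"),("U","U"),("TH","T"),("O","O"),("R","R"),("C","C"),("G","G"),
   ("W","W"),("H","H"),("N","N"),("I","I"),("J","J"),("EO","E"),("P","P"),
   ("X","X"),("S","S"),("T","T"),("B","B"),("E","E"),("M","M"),("L","L"),
   ("NG","N"),("OE","O"),("D","D"),("A","A"),("AE","A"),("Y","Y"),
   ("IA","I"),("EA","E")] := by decide

theorem pvContains1 (c : Char) :
    pvTok.contains (String.ofList [c]) = decide (c ∈ pvSingles) := by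
  rw [PySem.Dict.contains, pvTok_items]
  rw [show ("F":String) = String.ofList ['F'] from rfl, show ("U":String) = String.ofList ['U'] from rfl,
      show ("TH":String) = String.ofList ['T','H'] from rfl, show ("O":String) = String.ofList ['O'] from rfl,
      show ("R":String) = String.ofList ['R'] from rfl, show ("C":String) = String.ofList ['C'] from rfl,
      show ("G":String) = String.ofList ['G'] from rfl, show ("W":String) = String.ofList ['W'] from rfl,
      show ("H":String) = String.ofList ['H'] from rfl, show ("N":String) = String.ofList ['N'] from rfl,
      show ("I":String) = String.ofList ['I'] from rfl, show ("J":String) = String.ofList ['J'] from rfl,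
      show ("EO":String) = String.ofList ['E','O'] from rfl, show ("P":String) = String.ofList ['P'] from rfl,
      show ("X":String) = String.ofList ['X'] from rfl, show ("S":String) = String.ofList ['S'] from rfl,
      show ("T":String) = String.ofList ['T'] from rfl, show ("B":String) = String.ofList ['B'] from rfl,
      show ("E":String) = String.ofList ['E'] from rfl, show ("M":String) = String.ofList ['M'] from rfl,
      show ("L":String) = String.ofList ['L'] from rfl, show ("NG":String) = String.ofList ['N','G'] from rfl,
      show ("OE":String) = String.ofList ['O','E'] from rfl, show ("D":String) = String.ofList ['D'] from rfl,
      show ("A":String) = String.ofList ['A'] from rfl, show ("AE":String) = String.ofList ['A','E'] from rfl,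
      show ("Y":String) = String.ofList ['Y'] from rfl, show ("IA":String) = String.ofList ['I','A'] from rfl,
      show ("EA":String) = String.ofList ['E','A'] from rfl]
  simp only [List.any_cons, List.any_nil, beq_ofl, pvSingles, List.mem_cons, List.not_mem_nil]
  simp [eq_comm]

theorem pvContains2 (c d : Char) :
    pvTok.contains (String.ofList [c, d]) = decide ([c, d] ∈ pvDigs) := by
  rw [PySem.Dict.contains, pvTok_items]
  rw [show ("F":String) = String.ofList ['F'] from rfl, show ("U":String) = String.ofList ['U'] from rfl,
      show ("TH":String) = String.ofList ['T','H'] from rfl, show ("O":String) = String.ofList ['O'] from rfl,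
      show ("R":String) = String.ofList ['R'] from rfl, show ("C":String) = String.ofList ['C'] from rfl,
      show ("G":String) = String.ofList ['G'] from rfl, show ("W":String) = String.ofList ['W'] from rfl,
      show ("H":String) = String.ofList ['H'] from rfl, show ("N":String) = String.ofList ['N'] from rfl,
      show ("I":String) = String.ofList ['I'] from rfl, show ("J":String) = String.ofList ['J'] from rfl,
      show ("EO":String) = String.ofList ['E','O'] from rfl, show ("P":String) = String.ofList ['P'] from rfl,
      show ("X":String) = String.ofList ['X'] from rfl, show ("S":String) = String.ofList ['S'] from rfl,
      show ("T":String) = String.ofList ['T'] from rfl, show ("B":String) = String.ofList ['B'] from rfl,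
      show ("E":String) = String.ofList ['E'] from rfl, show ("M":String) = String.ofList ['M'] from rfl,
      show ("L":String) = String.ofList ['L'] from rfl, show ("NG":String) = String.ofList ['N','G'] from rfl,
      show ("OE":String) = String.ofList ['O','E'] from rfl, show ("D":String) = String.ofList ['D'] from rfl,
      show ("A":String) = String.ofList ['A'] from rfl, show ("AE":String) = String.ofList ['A','E'] from rfl,
      show ("Y":String) = String.ofList ['Y'] from rfl, show ("IA":String) = String.ofList ['I','A'] from rfl,
      show ("EA":String) = String.ofList ['E','A'] from rfl]
  simp only [List.any_cons, List.any_nil, beq_ofl, pvDigs, List.mem_cons, List.not_mem_nil]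
  simp [eq_comm]

theorem pvAlpha_single {c : Char} (h : c ∈ pvSingles) : PySem.Chars.isalpha c = true := by
  fin_cases h <;> decide

theorem pvAlpha_dig {c d : Char} (h : [c, d] ∈ pvDigs) : PySem.Chars.isalpha c = true := by
  fin_cases h <;> decide

theorem pvFindAll_cons (c : Char) (rest : List Char) :
    pvFindAll (c :: rest) =
      (match pvMatchAt pvTokenList (c :: rest) with
       | some t => t :: pvFindAll ((c :: rest).drop t.length)
       | none => pvFindAll rest) := by
  conv_lhs => unfold pvFindAll
  split <;> rename_i heq <;> rw [heq]

-- A's loop, rephrased on the suffix cs.drop i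
def pvStepA : List Char → List String
  | [] => []
  | c :: rest =>
    if PySem.Chars.isalpha c then
      match rest.head? with
      | some d =>
        if pvTok.contains (String.ofList [c, d]) then
          pvTok.getD (String.ofList [c, d]) "" :: pvStepA (rest.drop 1)
        else if pvTok.contains (String.ofList [c]) then
          pvTok.getD (String.ofList [c]) "" :: pvStepA rest
        else pvStepA rest
      | none =>
        if pvTok.contains (String.ofList [c]) then
          pvTok.getD (String.ofList [c]) "" :: pvStepA rest
        else pvStepA rest
    else pvStepA rest
termination_by cs => cs.length
decreasing_by all_goals simp

theorem pvMain : ∀ (n : Nat) (cs : List Char), cs.length ≤ n →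
    pvStepA cs = (pvFindAll cs).map (fun t => pvTok.getD (String.ofList t) "") := by
  intro n
  induction n with
  | zero =>
    intro cs hlen
    have : cs = [] := List.eq_nil_of_length_eq_zero (by omega)
    subst this; simp [pvStepA, pvFindAll]
  | succ n ih =>
    intro cs hlen
    match cs with
    | [] => simp [pvStepA, pvFindAll]
    | [c] =>
      rw [pvStepA, pvFindAll_cons, pvMatch_char1]
      by_cases h1 : c ∈ pvSingles
      · rw [if_pos h1, if_pos (pvAlpha_single h1)]
        simp [pvContains1, h1, pvStepA, pvFindAll]
      · rw [if_neg h1]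
        by_cases ha : PySem.Chars.isalpha c
        · rw [if_pos ha]
          simp [pvContains1, h1, pvStepA, pvFindAll]
        · rw [if_neg ha]
          simp [pvStepA, pvFindAll]
    | c :: d :: rest =>
      rw [pvStepA, pvFindAll_cons, pvMatch_char2]
      have hr : rest.length ≤ n := by simp at hlen; omega
      have hdr : (d :: rest).length ≤ n := by simp at hlen ⊢; omega
      by_cases h2 : [c, d] ∈ pvDigs
      · rw [if_pos h2, if_pos (pvAlpha_dig h2)]
        simp only [List.head?_cons, pvContains2, h2, decide_true, if_true, List.drop_succ_cons,
          List.drop_zero, List.map_cons]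
        rw [ih rest hr]
        simp
      · rw [if_neg h2]
        by_cases h1 : c ∈ pvSingles
        · rw [if_pos h1, if_pos (pvAlpha_single h1)]
          simp only [List.head?_cons, pvContains2, h2, decide_false, Bool.false_eq_true, if_false,
            pvContains1, h1, decide_true, if_true, List.drop_succ_cons, List.drop_zero,
            List.map_cons]
          rw [ih (d :: rest) hdr]
          simp
        · rw [if_neg h1]
          by_cases ha : PySem.Chars.isalpha c
          · rw [if_pos ha]
            simp only [List.head?_cons, pvContains2, h2, decide_false, Bool.false_eq_true,
              if_false, pvContains1, h1]
            exact ih (d :: rest) hdr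
          · rw [if_neg ha]
            exact ih (d :: rest) hdr

theorem pvLoopA_eq : ∀ (n : Nat) (cs : List Char) (i : Nat) (out : List String),
    cs.length - i ≤ n → pvLoopA cs i out = out ++ pvStepA (cs.drop i) := by
  intro n
  induction n with
  | zero =>
    intro cs i out hlen
    rw [pvLoopA, dif_neg (by omega), List.drop_eq_nil_of_le (by omega), pvStepA, List.append_nil]
  | succ n ih =>
    intro cs i out hlen
    by_cases h : i < cs.length
    · have hdrop : cs.drop i = cs[i] :: cs.drop (i+1) := List.drop_eq_getElem_cons h
      rw [pvLoopA, dif_pos h, hdrop, pvStepA]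
      have htail : (cs.drop (i+1)).drop 1 = cs.drop (i+2) := by
        rw [List.drop_drop]
      by_cases ha : PySem.Chars.isalpha cs[i]
      · rw [if_pos ha, if_pos ha]
        rcases hrest : cs.drop (i+1) with _ | ⟨d, rest'⟩
        · -- i is the last index
          have hlast : ¬ (i + 1 < cs.length) := by
            have := congrArg List.length hrest
            simp at this; omega
          rw [if_neg (by tauto)]
          simp only [List.head?_nil]
          by_cases h1 : pvTok.contains (String.ofList [cs[i]])
          · rw [if_pos h1, if_pos h1, ih cs (i+1) _ (by omega), hrest]
            simp
          · rw [if_neg h1, if_neg h1, ih cs (i+1) _ (by omega), hrest]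
        · have h1lt : i + 1 < cs.length := by
            by_contra hc
            rw [List.drop_eq_nil_of_le (by omega)] at hrest
            simp at hrest
          have hslice : PySem.List.slice cs (some (i:Int)) (some ((i:Int)+2)) = [cs[i], d] := by
            have h2 : ((i:Int)+2) = ((i:Int)+((2:Nat):Int)) := by norm_num
            rw [h2, PySem.List.slice_natCast_add, hdrop, hrest]
            rfl
          simp only [List.head?_cons, hslice]
          by_cases h2 : pvTok.contains (String.ofList [cs[i], d])
          · rw [if_pos ⟨h1lt, h2⟩, if_pos h2, ih cs (i+2) _ (by omega), ← htail, hrest]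
            simp
          · rw [if_neg (by tauto), if_neg h2]
            by_cases h1 : pvTok.contains (String.ofList [cs[i]])
            · rw [if_pos h1, if_pos h1, ih cs (i+1) _ (by omega), hrest]
              simp
            · rw [if_neg h1, if_neg h1, ih cs (i+1) _ (by omega), hrest]
      · rw [if_neg ha, if_neg ha, ih cs (i+1) _ (by omega)]
    · rw [pvLoopA, dif_neg h, List.drop_eq_nil_of_le (by omega), pvStepA, List.append_nil]

-- ===== VERDICT (by name: the statement is the Claim_ definition above) =====
theorem to_ascii_stream_spec : Claim_equal_to_ascii_stream := by
  intro rendered _hdom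
  unfold Spec_to_ascii_stream to_ascii_stream to_ascii_stream_alt
  rw [pvLoopA_eq rendered.toList.length rendered.toList 0 [] (by omega),
      List.drop_zero, List.nil_append,
      pvMain rendered.toList.length rendered.toList le_rfl]
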